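-- pv_equiv track=rewrite | github.com/oto321/COMPX216-A3 | assignment3.py | build_n_gram
-- ===== SOURCE A (Python) =====
-- def build_n_gram(sequence, n):
--     # Task 1.3
--     # Return an n-gram model.
--     # Replace the line below with your code.
--
--     # create the dictionary that will be returned
--     return_dictionary = {}
--
--     # for each item in sequence minus n plus one
--     for i in range(len(sequence) - n + 1):
--         # get the current items
--         curr_items = tuple  (sequence[i:i+n-1])
--
--         # get the next item
--         next_item = sequence[i + n - 1]
--
--         # check to see if the current item is not in the dictionary
--         if curr_items not in return_dictionary:
--             # add it to the dictionary
--             return_dictionary[curr_items] = {}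
--
--         # if the next item has not already appeared add it to the current item's value
--         if next_item not in return_dictionary[curr_items]:
--             # add next item to current item's value and set frequency to 1
--             return_dictionary[curr_items][next_item] = 1
--         else:
--             # otherwise add one to the frequency of the next item
--             return_dictionary[curr_items][next_item] += 1
--
--     # return the dictionary
--     return return_dictionary
-- ===== SOURCE B (Python) =====
-- def build_n_gram(sequence, n):
--     # Pass 1: count every (context, next) PAIR in one flat dictionary.
--     pair_counts = {}
--     for i in range(len(sequence) - n + 1):
--         pair = (tuple(sequence[i:i+n-1]), sequence[i + n - 1])
--         pair_counts[pair] = pair_counts.get(pair, 0) + 1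
--     # Pass 2: reshape the flat pair counts into the nested model.
--     model = {}
--     for (context, nxt), c in pair_counts.items():
--         model.setdefault(context, {})[nxt] = c
--     return model
-- ===== Notes on version B (the rewrite author's own statement) =====
-- stated objective: alternative
-- what changed: Instead of maintaining A's nested dict-of-dicts with membership checks while scanning, B counts flat (context, next) pairs in a single flat dictionary and then reshapes those flat counts into the nested model in a separate second pass.
import Mathlib
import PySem

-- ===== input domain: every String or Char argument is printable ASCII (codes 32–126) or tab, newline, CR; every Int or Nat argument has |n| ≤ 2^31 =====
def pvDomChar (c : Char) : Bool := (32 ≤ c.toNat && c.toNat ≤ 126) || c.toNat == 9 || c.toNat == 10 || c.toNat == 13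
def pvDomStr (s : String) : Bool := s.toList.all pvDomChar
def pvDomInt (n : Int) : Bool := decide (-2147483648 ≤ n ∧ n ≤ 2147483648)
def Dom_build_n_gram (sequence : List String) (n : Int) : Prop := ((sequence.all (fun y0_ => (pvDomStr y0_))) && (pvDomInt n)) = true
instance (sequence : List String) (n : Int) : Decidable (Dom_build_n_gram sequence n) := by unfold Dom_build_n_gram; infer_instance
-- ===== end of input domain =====

-- B replaces A's incrementally maintained nested dict-of-dicts by a flat (context, next)-pair
-- counting pass followed by a separate reshaping pass; objective: alternative decomposition.

-- ===== PORT A =====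
-- literal transliteration of A's loop: nested dict, membership checks, count updates.
-- (the only deviation: where Python's sequence[i+n-1] raises IndexError — excluded by Pre_ — the port reads "")
def build_n_gram (sequence : List String) (n : Int) : List (List String × List (String × Int)) :=
  (((PySem.List.pyRange 0 ((sequence.length : Int) - n + 1) 1).foldl
      (fun d i =>
        let curr_items := PySem.List.slice sequence (some i) (some (i + n - 1))
        let next_item := (PySem.List.pyGet? sequence (i + n - 1)).getD ""
        let d := if d.contains curr_items then d else d.insert curr_items PySem.Dict.empty
        let inner := d.getD curr_items PySem.Dict.empty
        let inner :=
          if inner.contains next_item then inner.modify next_item 0 (· + 1)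
          else inner.insert next_item 1
        d.insert curr_items inner)
      PySem.Dict.empty).items).map (fun p => (p.1, p.2.items))

-- ===== PORT B =====
-- literal transliteration of Source B: pass 1 counts flat pairs (pc[pair] = pc.get(pair, 0) + 1),
-- pass 2 reshapes (model.setdefault(context, {})[nxt] = c  =  modify context {} (inner.insert nxt c)).
def build_n_gram_alt (sequence : List String) (n : Int) : List (List String × List (String × Int)) :=
  let pair_counts :=
    (PySem.List.pyRange 0 ((sequence.length : Int) - n + 1) 1).foldl
      (fun pc i =>
        let pair := (PySem.List.slice sequence (some i) (some (i + n - 1)),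
                     (PySem.List.pyGet? sequence (i + n - 1)).getD "")
        pc.insert pair (pc.getD pair 0 + 1))
      (PySem.Dict.empty : PySem.Dict (List String × String) Int)
  let model :=
    pair_counts.items.foldl
      (fun m q => m.modify q.1.1 PySem.Dict.empty (fun inner => inner.insert q.1.2 q.2))
      (PySem.Dict.empty : PySem.Dict (List String) (PySem.Dict String Int))
  model.items.map (fun p => (p.1, p.2.items))

-- ===== PRECONDITION & SPEC =====
-- Pre_ excludes exactly the inputs where Python A raises IndexError (the next-item index
-- i+n-1 = n-1 falls below -len(sequence) at i = 0), i.e. it requires 1 - len(sequence) ≤ n.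
def Pre_build_n_gram (sequence : List String) (n : Int) : Prop :=
  1 - (sequence.length : Int) ≤ n
instance (sequence : List String) (n : Int) : Decidable (Pre_build_n_gram sequence n) := by
  unfold Pre_build_n_gram; infer_instance

def pvWitness_build_n_gram : List String × Int := (["a", "b", "a", "b", "c"], 2)

def Spec_build_n_gram (sequence : List String) (n : Int) (out : List (List String × List (String × Int))) : Prop := out = build_n_gram_alt sequence n
instance (sequence : List String) (n : Int) (out : List (List String × List (String × Int))) : Decidable (Spec_build_n_gram sequence n out) := by unfold Spec_build_n_gram; infer_instance

-- ===== CLAIM (what is proved, stated in full; the proofs are below) =====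
def Claim_equal_build_n_gram : Prop := ∀ (sequence : List String) (n : Int), Dom_build_n_gram sequence n → Pre_build_n_gram sequence n → Spec_build_n_gram sequence n (build_n_gram sequence n)

-- ===== LEMMAS AND PROOFS =====

theorem pvStepA {κ σ : Type} [BEq κ] [LawfulBEq κ] [BEq σ] [LawfulBEq σ]
    (d : PySem.Dict κ (PySem.Dict σ Int)) (k : κ) (x : σ) :
    (let d' := if d.contains k then d else d.insert k PySem.Dict.empty
     let inner := d'.getD k PySem.Dict.empty
     let inner' :=
       if inner.contains x then inner.modify x 0 (· + 1)
       else inner.insert x 1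
     d'.insert k inner')
    = d.modify k PySem.Dict.empty (fun inner => inner.modify x 0 (· + 1)) := by
  simp only [PySem.Dict.modify]
  by_cases hk : d.contains k = true
  · simp only [hk, if_true]
    by_cases hx : (d.getD k PySem.Dict.empty).contains x = true
    · simp [hx]
    · simp only [hx, Bool.false_eq_true, if_false]
      rw [PySem.Dict.getD_of_not_contains (d.getD k PySem.Dict.empty) 0 (by simpa using hx)]
      norm_num
  · simp only [hk, Bool.false_eq_true, if_false]
    rw [PySem.Dict.getD_insert_self,
      PySem.Dict.getD_of_not_contains d PySem.Dict.empty (by simpa using hk)]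
    simp [PySem.Dict.contains_empty, PySem.Dict.insert_insert_self, PySem.Dict.getD_empty]

theorem pvGetDFoldModify {κ ν β : Type} [BEq κ] [LawfulBEq κ] [DecidableEq κ]
    (key : β → κ) (g : ν → β → ν) (dflt : ν) :
    ∀ (L : List β) (m : PySem.Dict κ ν) (k : κ),
    (L.foldl (fun m q => m.modify (key q) dflt (fun v => g v q)) m).getD k dflt
      = (L.filter (fun q => key q == k)).foldl g (m.getD k dflt) := by
  intro L
  induction L with
  | nil => intro m k; rfl
  | cons q t ih =>
    intro m k
    simp only [List.foldl_cons, List.filter_cons]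
    rw [ih]
    by_cases h : key q = k
    · simp [h]
    · have : (key q == k) = false := by simp [h]
      simp [this, PySem.Dict.getD_modify, Ne.symm h]

theorem pvOfListFilter {α : Type} [BEq α] [LawfulBEq α] (p : α → Bool) (l : List α) :
    (PySem.Set.ofList l).filter p = PySem.Set.ofList (l.filter p) := by
  induction l using List.reverseRecOn with
  | nil => rfl
  | append_singleton t x ih =>
    rw [PySem.Set.ofList_append_singleton, List.filter_append]
    by_cases hx : x ∈ t
    · rw [PySem.Set.add_of_mem (by simpa [PySem.Set.mem_ofList] using hx)]
      by_cases hp : p x = true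
      · simp only [List.filter_cons, hp, if_true, List.filter_nil,
          PySem.Set.ofList_append_singleton, ih]
        rw [PySem.Set.add_of_mem]
        rw [PySem.Set.mem_ofList]
        exact List.mem_filter.mpr ⟨hx, hp⟩
      · simp [hp, ih]
    · rw [PySem.Set.add_of_not_mem (by simpa [PySem.Set.mem_ofList] using hx), List.filter_append]
      by_cases hp : p x = true
      · simp only [List.filter_cons, hp, if_true, List.filter_nil,
          PySem.Set.ofList_append_singleton, ih]
        rw [PySem.Set.add_of_not_mem]
        rw [PySem.Set.mem_ofList]
        exact fun hmem => hx (List.mem_of_mem_filter hmem)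
      · simp [hp, ih]

theorem pvOfListMapInj {α β : Type} [BEq α] [LawfulBEq α] [BEq β] [LawfulBEq β]
    (f : α → β) (hf : Function.Injective f) (l : List α) :
    PySem.Set.ofList (l.map f) = (PySem.Set.ofList l).map f := by
  induction l using List.reverseRecOn with
  | nil => rfl
  | append_singleton t x ih =>
    rw [List.map_append, List.map_singleton, PySem.Set.ofList_append_singleton,
      PySem.Set.ofList_append_singleton, ih]
    by_cases hx : x ∈ t
    · rw [PySem.Set.add_of_mem (s := PySem.Set.ofList t) (by simpa [PySem.Set.mem_ofList] using hx),
        PySem.Set.add_of_mem (List.mem_map.mpr ⟨x, (PySem.Set.mem_ofList t x).mpr hx, rfl⟩)]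
    · have h2 : f x ∉ (PySem.Set.ofList t).map f := by
        intro hmem
        obtain ⟨y, hy, hyx⟩ := List.mem_map.mp hmem
        exact hx ((hf hyx) ▸ (PySem.Set.mem_ofList t y).mp hy)
      rw [PySem.Set.add_of_not_mem (s := PySem.Set.ofList t)
          (by simpa [PySem.Set.mem_ofList] using hx),
        PySem.Set.add_of_not_mem h2, List.map_append, List.map_singleton]

theorem pvOfListMapOfList {α β : Type} [BEq α] [LawfulBEq α] [BEq β] [LawfulBEq β]
    (f : α → β) (l : List α) :
    PySem.Set.ofList ((PySem.Set.ofList l).map f) = PySem.Set.ofList (l.map f) := by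
  induction l using List.reverseRecOn with
  | nil => rfl
  | append_singleton t x ih =>
    rw [PySem.Set.ofList_append_singleton, List.map_append, List.map_singleton,
      PySem.Set.ofList_append_singleton]
    by_cases hx : x ∈ t
    · rw [PySem.Set.add_of_mem (s := PySem.Set.ofList t) (by simpa [PySem.Set.mem_ofList] using hx),
        PySem.Set.add_of_mem
          (by rw [PySem.Set.mem_ofList]; exact List.mem_map.mpr ⟨x, hx, rfl⟩), ih]
    · rw [PySem.Set.add_of_not_mem (s := PySem.Set.ofList t)
          (by simpa [PySem.Set.mem_ofList] using hx),
        List.map_append, List.map_singleton, PySem.Set.ofList_append_singleton, ih]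

theorem pvCountPair {κ σ : Type} [BEq κ] [LawfulBEq κ] [BEq σ] [LawfulBEq σ] [DecidableEq κ] [DecidableEq σ]
    (l : List (κ × σ)) (k : κ) (x : σ) :
    l.count (k, x) = ((l.filter (fun q => q.1 == k)).map (·.2)).count x := by
  induction l with
  | nil => rfl
  | cons q t ih =>
    rcases q with ⟨a, b⟩
    by_cases ha : a = k
    · subst ha
      by_cases hb : b = x
      · subst hb; simp [ih]
      · simp [ih, hb]
    · have : ((a, b) = (k, x)) = False := by simp [ha]
      simp [ih, ha, this]

-- A's nested fold: the inner dict at k is the counter of the next-items grouped under k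
theorem pvInnerL {κ σ : Type} [BEq κ] [LawfulBEq κ] [DecidableEq κ] [BEq σ] [LawfulBEq σ]
    (pairs : List (κ × σ)) (k : κ) :
    ((pairs.foldl
        (fun d q => d.modify q.1 PySem.Dict.empty (fun inner => inner.modify q.2 0 (· + 1)))
        (PySem.Dict.empty : PySem.Dict κ (PySem.Dict σ Int))).getD k PySem.Dict.empty)
      = PySem.Dict.counter ((pairs.filter (fun q => q.1 == k)).map (·.2)) := by
  have h := pvGetDFoldModify (fun q : κ × σ => q.1)
      (fun (inner : PySem.Dict σ Int) q => inner.modify q.2 0 (· + 1))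
      PySem.Dict.empty pairs PySem.Dict.empty k
  beta_reduce at h
  rw [h]
  rw [PySem.Dict.getD_empty, PySem.Dict.counter_eq_foldl, List.foldl_map]

-- B's reshape fold: the inner dict at k is the same counter
theorem pvInnerR {κ σ : Type} [BEq κ] [LawfulBEq κ] [DecidableEq κ] [BEq σ] [LawfulBEq σ] [DecidableEq σ]
    (pairs : List (κ × σ)) (k : κ) :
    (((PySem.Set.ofList pairs).foldl
        (fun m q => m.modify q.1 PySem.Dict.empty
          (fun inner => inner.insert q.2 ((pairs.count q : Nat) : Int)))
        (PySem.Dict.empty : PySem.Dict κ (PySem.Dict σ Int))).getD k PySem.Dict.empty)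
      = PySem.Dict.counter ((pairs.filter (fun q => q.1 == k)).map (·.2)) := by
  have h := pvGetDFoldModify (fun q : κ × σ => q.1)
      (fun (inner : PySem.Dict σ Int) q => inner.insert q.2 ((pairs.count q : Nat) : Int))
      PySem.Dict.empty (PySem.Set.ofList pairs) PySem.Dict.empty k
  beta_reduce at h
  rw [h]
  rw [PySem.Dict.getD_empty, pvOfListFilter]
  -- the filtered distinct pairs are the distinct next-items tagged with k
  have hF : pairs.filter (fun q => q.1 == k)
      = ((pairs.filter (fun q => q.1 == k)).map (·.2)).map (fun x => (k, x)) := by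
    rw [List.map_map]
    conv_lhs => rw [← List.map_id (pairs.filter (fun q => q.1 == k))]
    apply List.map_congr_left
    intro q hq
    have := (List.mem_filter.mp hq).2
    have hq1 : q.1 = k := by simpa using this
    simp [Function.comp, ← hq1]
  set ys := (pairs.filter (fun q => q.1 == k)).map (·.2) with hys
  have hinj : Function.Injective (fun x : σ => (k, x)) := by
    intro a b h; simpa using h
  rw [hF, pvOfListMapInj _ hinj, List.foldl_map]
  have hfun : (fun (inner : PySem.Dict σ Int) x =>
        inner.insert x ((pairs.count (k, x) : Nat) : Int))
      = (fun (inner : PySem.Dict σ Int) x => inner.insert x ((ys.count x : Nat) : Int)) := by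
    funext inner x
    rw [pvCountPair pairs k x]
  rw [hfun]
  apply PySem.Dict.ext
  rw [PySem.Dict.items_foldl_insert_fresh (PySem.Set.ofList ys) (fun x => x)
      (fun x => ((ys.count x : Nat) : Int)) PySem.Dict.empty
      (fun a _ => PySem.Dict.contains_empty a) (by simp [PySem.Set.nodup_ofList])]
  rw [PySem.Dict.items_counter]
  rfl

-- the heart: over ANY pair list, A's incremental nested fold = B's reshape of the flat counter
theorem pvMain {κ σ : Type} [BEq κ] [LawfulBEq κ] [DecidableEq κ] [BEq σ] [LawfulBEq σ] [DecidableEq σ]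
    (pairs : List (κ × σ)) :
    pairs.foldl (fun d q => d.modify q.1 PySem.Dict.empty (fun inner => inner.modify q.2 0 (· + 1)))
      (PySem.Dict.empty : PySem.Dict κ (PySem.Dict σ Int))
    = (PySem.Dict.counter pairs).items.foldl
        (fun m q => m.modify q.1.1 PySem.Dict.empty (fun inner => inner.insert q.1.2 q.2))
        PySem.Dict.empty := by
  rw [PySem.Dict.items_counter, List.foldl_map]
  have hkL : (pairs.foldl
      (fun d q => d.modify q.1 PySem.Dict.empty (fun inner => inner.modify q.2 0 (· + 1)))
      (PySem.Dict.empty : PySem.Dict κ (PySem.Dict σ Int))).keys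
      = PySem.Set.ofList (pairs.map (·.1)) := by
    rw [PySem.Dict.keys_foldl_modify_key pairs (fun q => q.1) PySem.Dict.empty
      (fun _ q => fun inner => inner.modify q.2 0 (· + 1)) PySem.Dict.empty]
    simp [PySem.Dict.keys_empty, PySem.Set.update_nil_left]
  have hkR : ((PySem.Set.ofList pairs).foldl
      (fun m q => m.modify q.1 PySem.Dict.empty
        (fun inner => inner.insert q.2 ((pairs.count q : Nat) : Int)))
      (PySem.Dict.empty : PySem.Dict κ (PySem.Dict σ Int))).keys
      = PySem.Set.ofList (pairs.map (·.1)) := by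
    rw [PySem.Dict.keys_foldl_modify_key (PySem.Set.ofList pairs) (fun q => q.1) PySem.Dict.empty
      (fun _ q => fun inner => inner.insert q.2 ((pairs.count q : Nat) : Int)) PySem.Dict.empty]
    simp only [PySem.Dict.keys_empty, PySem.Set.update_nil_left]
    exact pvOfListMapOfList (fun q => q.1) pairs
  apply PySem.Dict.ext
  rw [PySem.Dict.items_eq_map_keys _ (by rw [hkL]; exact PySem.Set.nodup_ofList _) PySem.Dict.empty,
      PySem.Dict.items_eq_map_keys _ (by rw [hkR]; exact PySem.Set.nodup_ofList _) PySem.Dict.empty,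
      hkL, hkR]
  apply List.map_congr_left
  intro k _
  rw [pvInnerL, pvInnerR]

-- ===== VERDICT (by name: the statement is the Claim_ definition above) =====
theorem build_n_gram_spec : Claim_equal_build_n_gram := by
  intro sequence n _ _
  unfold Spec_build_n_gram build_n_gram build_n_gram_alt
  simp only []
  -- name the per-window (context, next) pair
  set P : Int → (List String × String) := fun i =>
    (PySem.List.slice sequence (some i) (some (i + n - 1)),
     (PySem.List.pyGet? sequence (i + n - 1)).getD "") with hP
  set windows := PySem.List.pyRange 0 ((sequence.length : Int) - n + 1) 1 with hw
  -- A's loop body is one modify at the context key (pvStepA), over the pair of the window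
  have hA : (windows.foldl
      (fun d i =>
        let curr_items := PySem.List.slice sequence (some i) (some (i + n - 1))
        let next_item := (PySem.List.pyGet? sequence (i + n - 1)).getD ""
        let d := if d.contains curr_items then d else d.insert curr_items PySem.Dict.empty
        let inner := d.getD curr_items PySem.Dict.empty
        let inner :=
          if inner.contains next_item then inner.modify next_item 0 (· + 1)
          else inner.insert next_item 1
        d.insert curr_items inner)
      (PySem.Dict.empty : PySem.Dict (List String) (PySem.Dict String Int)))
      = (windows.map P).foldl
          (fun d q => d.modify q.1 PySem.Dict.empty (fun inner => inner.modify q.2 0 (· + 1)))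
          PySem.Dict.empty := by
    rw [List.foldl_map]
    apply List.foldl_ext
    intro d i _
    exact pvStepA d (P i).1 (P i).2
  -- B's first loop is the flat pair counter
  have hB : (windows.foldl
      (fun pc i =>
        let pair := P i
        pc.insert pair (pc.getD pair 0 + 1))
      (PySem.Dict.empty : PySem.Dict (List String × String) Int))
      = PySem.Dict.counter (windows.map P) := by
    rw [← PySem.Dict.foldl_insert_getD_add_one_eq_counter, List.foldl_map]
  rw [hA, hB, pvMain (windows.map P)]
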